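-- pv_equiv track=rewrite | github.com/zhzhgaga/seq2seq_pro | couplet/DataLoader.py | decoder_text
-- ===== SOURCE A (Python) =====
-- def decoder_text(label, vocabs, end_tokens='</s>'):
--     results = []
--     for idx in label:
--         word = vocabs[idx]
--         if word == end_tokens:
--             return " ".join(results)
--         results.append(word)
--     return ' '.join(results)
-- ===== SOURCE B (Python) =====
-- def decoder_text(label, vocabs, end_tokens='</s>'):
--     cut = len(label)
--     for i, idx in enumerate(label):
--         if vocabs[idx] == end_tokens:
--             cut = i
--             break
--     return " ".join(vocabs[idx] for idx in label[:cut])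
-- ===== Notes on version B (the rewrite author's own statement) =====
-- stated objective: alternative
-- what changed: B first locates the cut position (index of the first end token) with a break, then builds the output in a second phase by joining a generator over the slice label[:cut], instead of A's single loop that maintains a growing results accumulator with an early return inside the loop.
import Mathlib
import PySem

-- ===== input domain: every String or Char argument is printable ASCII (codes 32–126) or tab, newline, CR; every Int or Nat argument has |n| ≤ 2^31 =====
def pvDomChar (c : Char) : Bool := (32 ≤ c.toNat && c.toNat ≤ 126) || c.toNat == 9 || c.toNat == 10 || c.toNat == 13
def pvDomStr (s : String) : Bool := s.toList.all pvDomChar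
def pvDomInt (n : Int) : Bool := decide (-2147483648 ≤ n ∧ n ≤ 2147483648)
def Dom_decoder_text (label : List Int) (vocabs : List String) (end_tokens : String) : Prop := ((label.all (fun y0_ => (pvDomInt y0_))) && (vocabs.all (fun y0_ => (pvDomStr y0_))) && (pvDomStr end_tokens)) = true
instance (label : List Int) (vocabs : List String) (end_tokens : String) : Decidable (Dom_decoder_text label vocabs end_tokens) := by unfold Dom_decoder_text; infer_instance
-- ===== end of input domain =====

-- B replaces A's accumulator loop with early return by a two-phase plan: find the cut
-- position of the first end token, then join the words of the slice label[:cut]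
-- (objective: alternative decomposition, same O(n) cost).

-- ===== PORT A =====
-- vocabs[idx] is ported as pyGetD with default "": exact under Pre_decoder_text,
-- which excludes the inputs where Python A raises IndexError.
def decoder_text_go (label : List Int) (vocabs : List String) (end_tokens : String) (results : List String) : String :=
  match label with
  | [] => PySem.Str.join " " results
  | idx :: rest =>
    let word := PySem.List.pyGetD vocabs idx ""
    if word == end_tokens then PySem.Str.join " " results
    else decoder_text_go rest vocabs end_tokens (results ++ [word])

def decoder_text (label : List Int) (vocabs : List String) (end_tokens : String) : String :=
  decoder_text_go label vocabs end_tokens []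

-- ===== PORT B =====
-- phase 1 of Source B: the loop that finds the cut position (cut = len(label) if no end token)
def decoder_text_cut (label : List Int) (vocabs : List String) (end_tokens : String) : Nat :=
  match label with
  | [] => 0
  | idx :: rest =>
    if PySem.List.pyGetD vocabs idx "" == end_tokens then 0
    else 1 + decoder_text_cut rest vocabs end_tokens

-- phase 2 of Source B: " ".join(vocabs[idx] for idx in label[:cut])
def decoder_text_alt (label : List Int) (vocabs : List String) (end_tokens : String) : String :=
  PySem.Str.join " "
    ((label.take (decoder_text_cut label vocabs end_tokens)).map
      (fun idx => PySem.List.pyGetD vocabs idx ""))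

-- ===== PRECONDITION & SPEC =====
-- Pre_ excludes exactly the inputs on which Python A raises IndexError: some index of
-- label that is out of range for vocabs and is not strictly preceded by an end token.
def Pre_decoder_text (label : List Int) (vocabs : List String) (end_tokens : String) : Prop :=
  ∀ k, k < label.length →
    (∀ j, j < k → PySem.Raise.InRange vocabs.length (label.getD j 0) ∧
                  PySem.List.pyGetD vocabs (label.getD j 0) "" ≠ end_tokens) →
    PySem.Raise.InRange vocabs.length (label.getD k 0)

instance (label : List Int) (vocabs : List String) (end_tokens : String) : Decidable (Pre_decoder_text label vocabs end_tokens) := by unfold Pre_decoder_text; infer_instance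

def pvWitness_decoder_text : List Int × List String × String := ([0, 1, 0], ["ab", "</s>"], "</s>")

def Spec_decoder_text (label : List Int) (vocabs : List String) (end_tokens : String) (out : String) : Prop := out = decoder_text_alt label vocabs end_tokens
instance (label : List Int) (vocabs : List String) (end_tokens : String) (out : String) : Decidable (Spec_decoder_text label vocabs end_tokens out) := by unfold Spec_decoder_text; infer_instance

-- ===== CLAIM (what is proved, stated in full; the proofs are below) =====
def Claim_equal_decoder_text : Prop := ∀ (label : List Int) (vocabs : List String) (end_tokens : String), Dom_decoder_text label vocabs end_tokens → Pre_decoder_text label vocabs end_tokens → Spec_decoder_text label vocabs end_tokens (decoder_text label vocabs end_tokens)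

-- ===== LEMMAS AND PROOFS =====

-- A's accumulator loop equals "join of the accumulator followed by the taken prefix";
-- it holds for all inputs, so the equivalence needs no use of Pre_ beyond its role of
-- excluding inputs where the Pythons raise.
theorem decoder_text_go_eq (label : List Int) (vocabs : List String) (end_tokens : String)
    (results : List String) :
    decoder_text_go label vocabs end_tokens results =
      PySem.Str.join " " (results ++
        (label.take (decoder_text_cut label vocabs end_tokens)).map
          (fun idx => PySem.List.pyGetD vocabs idx "")) := by
  induction label generalizing results with
  | nil => simp [decoder_text_go, decoder_text_cut]
  | cons idx rest ih =>
    by_cases h : PySem.List.pyGetD vocabs idx "" == end_tokens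
    · simp [decoder_text_go, decoder_text_cut, h]
    · simp only [decoder_text_go, decoder_text_cut, h, if_neg, Bool.false_eq_true,
        not_false_eq_true]
      rw [ih]
      simp [List.take_succ_cons, Nat.add_comm 1]

-- ===== VERDICT (by name: the statement is the Claim_ definition above) =====
theorem decoder_text_spec : Claim_equal_decoder_text := by
  intro label vocabs end_tokens _ _
  unfold Spec_decoder_text decoder_text decoder_text_alt
  rw [decoder_text_go_eq]
  simp
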